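-- pv_equiv track=rewrite | github.com/Saketh-09/DumpyDataSeriesIndex | src/Utils/TimeSeriesUtil.py | get_4_bits_changed_nums
-- ===== SOURCE A (Python) =====
-- def get_4_bits_changed_nums(x, n):
--     res = []
--     for i in range(1, n - 2):
--         for j in range(i + 1, n - 1):
--             for k in range(j + 1, n):
--                 temp = (1 << (i - 1)) + (1 << (j - 1)) + (1 << (k - 1))
--                 mask = 1 << k
--                 for m in range(k + 1, n + 1):
--                     real_mask = mask + temp
--                     res.append(x ^ real_mask)
--                     mask <<= 1
--     return res
-- ===== SOURCE B (Python) =====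
-- def get_4_bits_changed_nums(x, n):
--     # recursive generation of 4-subsets of bit positions 0..n-1, lex order
--     pow2 = [1 << p for p in range(n)]
--     def combs(start, r):
--         if r == 1:
--             return pow2[start:]
--         return [pw + rest
--                 for p in range(start, n - r + 1)
--                 for pw in (pow2[p],)
--                 for rest in combs(p + 1, r - 1)]
--     return [x ^ m for m in combs(0, 4)]
-- ===== Notes on version B (the rewrite author's own statement) =====
-- stated objective: simpler
-- what changed: A's four hand-written nested loops with incremental shift/mask bookkeeping (temp, mask <<= 1) are replaced by a single recursive generator of 4-element bit-position combinations whose masks are built directly as 1 << p sums, preserving lexicographic emission order.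
import Mathlib
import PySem

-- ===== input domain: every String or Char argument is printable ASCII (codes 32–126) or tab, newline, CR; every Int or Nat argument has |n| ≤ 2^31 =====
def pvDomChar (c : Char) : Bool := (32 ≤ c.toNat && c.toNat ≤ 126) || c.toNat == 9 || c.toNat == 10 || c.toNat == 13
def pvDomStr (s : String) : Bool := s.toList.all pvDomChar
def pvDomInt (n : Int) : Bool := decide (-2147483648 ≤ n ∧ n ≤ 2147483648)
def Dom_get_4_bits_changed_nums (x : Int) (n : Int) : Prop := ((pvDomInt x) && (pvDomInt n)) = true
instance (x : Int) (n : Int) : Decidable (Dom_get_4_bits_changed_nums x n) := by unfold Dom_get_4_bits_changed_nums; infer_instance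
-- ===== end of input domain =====

-- B replaces A's four hand-written nested loops with incremental mask-shift bookkeeping by a
-- recursive generator of 4-element bit-position combinations (objective: simpler decomposition).


-- shared helper: Python's `1 << e` (the exponents below are nonnegative wherever the loops reach them)
def pvShl1 (e : Nat) : Int := (1 : Int) <<< e

-- ===== PORT A =====
def get_4_bits_changed_nums (x : Int) (n : Int) : List Int :=
  (PySem.List.pyRange 1 (n - 2) 1).foldl (fun res i =>
    (PySem.List.pyRange (i + 1) (n - 1) 1).foldl (fun res j =>
      (PySem.List.pyRange (j + 1) n 1).foldl (fun res k =>
        let temp : Int := pvShl1 (i - 1).toNat + pvShl1 (j - 1).toNat + pvShl1 (k - 1).toNat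
        ((PySem.List.pyRange (k + 1) (n + 1) 1).foldl
            (fun (st : List Int × Int) _m =>
              let real_mask := st.2 + temp
              (st.1 ++ [PySem.Int.bxor x real_mask], st.2 <<< (1 : Nat)))
            (res, pvShl1 k.toNat)).1
      ) res) res) []

-- ===== PORT B =====
-- B's `combs`: masks of all r-element subsets of bit positions start..n-1, lexicographic order.
-- (B never calls combs with r = 0 — Python would not terminate there — so that branch returns [].)
def pvCombs (n : Int) (pow2 : List Int) : Int → Nat → List Int
  | _, 0 => []
  | start, 1 => PySem.List.slice pow2 (some start) none
  | start, r + 2 =>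
      (PySem.List.pyRange start (n - ((r : Int) + 1)) 1).flatMap (fun p =>
        [PySem.List.pyGetD pow2 p 0].flatMap (fun pw =>
          (pvCombs n pow2 (p + 1) (r + 1)).map (fun rest => pw + rest)))

def get_4_bits_changed_nums_alt (x : Int) (n : Int) : List Int :=
  let pow2 := (PySem.List.pyRange 0 n 1).map (fun p => pvShl1 p.toNat)
  (pvCombs n pow2 0 4).map (fun m => PySem.Int.bxor x m)

-- ===== PRECONDITION & SPEC =====
def Spec_get_4_bits_changed_nums (x : Int) (n : Int) (out : List Int) : Prop := out = get_4_bits_changed_nums_alt x n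
instance (x : Int) (n : Int) (out : List Int) : Decidable (Spec_get_4_bits_changed_nums x n out) := by unfold Spec_get_4_bits_changed_nums; infer_instance

-- ===== CLAIM (what is proved, stated in full; the proofs are below) =====
def Claim_equal_get_4_bits_changed_nums : Prop := ∀ (x : Int) (n : Int), Dom_get_4_bits_changed_nums x n → Spec_get_4_bits_changed_nums x n (get_4_bits_changed_nums x n)

-- ===== LEMMAS AND PROOFS =====

-- A's inner m-loop with the doubling mask (starting at 2^c, the loop entering at a = c+1)
-- appends exactly x ^ (2^(m-1) + temp) for each m of the range.
lemma pv_inner (x temp b : Int) :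
    ∀ (a c : Int) (acc : List Int), 0 ≤ c → a = c + 1 →
      ((PySem.List.pyRange a b 1).foldl
          (fun (st : List Int × Int) _m =>
            (st.1 ++ [PySem.Int.bxor x (st.2 + temp)], st.2 <<< (1 : Nat)))
          (acc, pvShl1 c.toNat)).1
        = acc ++ (PySem.List.pyRange a b 1).map
            (fun m => PySem.Int.bxor x (pvShl1 (m - 1).toNat + temp)) := by
  intro a c acc hc hac
  by_cases hab : a < b
  · generalize hN : (b - a).toNat = N
    induction N generalizing a c acc with
    | zero => omega
    | succ N ih =>
      rw [PySem.List.pyRange_one_cons hab]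
      simp only [List.foldl_cons, List.map_cons]
      have hm1 : a - 1 = c := by omega
      have hsh : (pvShl1 c.toNat) <<< (1 : Nat) = pvShl1 (c + 1).toNat := by
        have h1 : (c + 1).toNat = c.toNat + 1 := by omega
        rw [pvShl1, pvShl1, h1]
        simp only [Int.shiftLeft_eq, pow_succ]
        ring
      rw [hm1, hsh]
      by_cases hab' : a + 1 < b
      · rw [ih (a + 1) (c + 1) _ (by omega) (by omega) hab' (by omega)]
        simp only [List.append_assoc, List.singleton_append]
      · rw [PySem.List.pyRange_one_eq_nil (by omega : b ≤ a + 1)]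
        simp
  · rw [PySem.List.pyRange_one_eq_nil (by omega : b ≤ a)]
    simp

-- flatMap over a range translated by one position
lemma pv_shift {β : Type} (f g : Int → List β) (b : Int) :
    ∀ a : Int, (∀ t, a ≤ t → t < b → f (t + 1) = g t) →
      (PySem.List.pyRange (a + 1) (b + 1) 1).flatMap f
        = (PySem.List.pyRange a b 1).flatMap g := by
  intro a h
  by_cases hab : a < b
  · generalize hN : (b - a).toNat = N
    induction N generalizing a with
    | zero => omega
    | succ N ih =>
      rw [PySem.List.pyRange_one_cons hab, PySem.List.pyRange_one_cons (by omega : a + 1 < b + 1)]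
      simp only [List.flatMap_cons]
      rw [h a (le_refl a) hab]
      by_cases hab' : a + 1 < b
      · rw [ih (a + 1) (fun t h1 h2 => h t (by omega) h2) hab' (by omega)]
      · rw [PySem.List.pyRange_one_eq_nil (by omega : b ≤ a + 1),
            PySem.List.pyRange_one_eq_nil (by omega : b + 1 ≤ a + 1 + 1)]
        simp
  · rw [PySem.List.pyRange_one_eq_nil (by omega : b ≤ a),
        PySem.List.pyRange_one_eq_nil (by omega : b + 1 ≤ a + 1)]
    rfl

-- map over a range translated by one position
lemma pv_shift_map {β : Type} (f g : Int → β) (b : Int) :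
    ∀ a : Int, (∀ t, a ≤ t → t < b → f (t + 1) = g t) →
      (PySem.List.pyRange (a + 1) (b + 1) 1).map f
        = (PySem.List.pyRange a b 1).map g := by
  intro a h
  by_cases hab : a < b
  · generalize hN : (b - a).toNat = N
    induction N generalizing a with
    | zero => omega
    | succ N ih =>
      rw [PySem.List.pyRange_one_cons hab, PySem.List.pyRange_one_cons (by omega : a + 1 < b + 1)]
      simp only [List.map_cons]
      rw [h a (le_refl a) hab]
      by_cases hab' : a + 1 < b
      · rw [ih (a + 1) (fun t h1 h2 => h t (by omega) h2) hab' (by omega)]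
      · rw [PySem.List.pyRange_one_eq_nil (by omega : b ≤ a + 1),
            PySem.List.pyRange_one_eq_nil (by omega : b + 1 ≤ a + 1 + 1)]
        simp
  · rw [PySem.List.pyRange_one_eq_nil (by omega : b ≤ a),
        PySem.List.pyRange_one_eq_nil (by omega : b + 1 ≤ a + 1)]
    rfl

-- pointwise congruence for flatMap over the members of a list
lemma pv_flatMap_congr {α β : Type} {l : List α} {f g : α → List β}
    (h : ∀ y ∈ l, f y = g y) : l.flatMap f = l.flatMap g := by
  induction l with
  | nil => rfl
  | cons z zs ih =>
    simp only [List.flatMap_cons, h z (List.mem_cons_self), ih (fun y hy => h y (List.mem_cons_of_mem z hy))]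

-- dropping k elements of a mapped range shifts its start by k
lemma pv_drop_pyRange_map (f : Int → Int) (b : Int) :
    ∀ (k : Nat) (a : Int), ((PySem.List.pyRange a b 1).map f).drop k
      = (PySem.List.pyRange (a + (k : Int)) b 1).map f := by
  intro k
  induction k with
  | zero => intro a; simp
  | succ k ih =>
    intro a
    have hcast : ((k + 1 : Nat) : Int) = (k : Int) + 1 := by push_cast; ring
    by_cases hab : a < b
    · rw [PySem.List.pyRange_one_cons hab]
      simp only [List.map_cons, List.drop_succ_cons]
      rw [ih (a + 1), hcast, show a + ((k : Int) + 1) = a + 1 + (k : Int) by ring]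
    · rw [PySem.List.pyRange_one_eq_nil (by omega : b ≤ a), hcast,
          PySem.List.pyRange_one_eq_nil (by omega : b ≤ a + ((k : Int) + 1))]
      simp

-- ===== VERDICT (by name: the statement is the Claim_ definition above) =====
theorem get_4_bits_changed_nums_spec : Claim_equal_get_4_bits_changed_nums := by
  intro x n _
  unfold Spec_get_4_bits_changed_nums
  -- A as a tower of flatMaps
  have h3 : ∀ (res : List Int) (i j : Int), 0 ≤ j →
      (PySem.List.pyRange (j + 1) n 1).foldl (fun res k =>
        ((PySem.List.pyRange (k + 1) (n + 1) 1).foldl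
            (fun (st : List Int × Int) _m =>
              (st.1 ++ [PySem.Int.bxor x (st.2 +
                (pvShl1 (i - 1).toNat + pvShl1 (j - 1).toNat + pvShl1 (k - 1).toNat))],
               st.2 <<< (1 : Nat)))
            (res, pvShl1 k.toNat)).1) res
      = res ++ (PySem.List.pyRange (j + 1) n 1).flatMap (fun k =>
          (PySem.List.pyRange (k + 1) (n + 1) 1).map (fun m =>
            PySem.Int.bxor x (pvShl1 (m - 1).toNat +
              (pvShl1 (i - 1).toNat + pvShl1 (j - 1).toNat + pvShl1 (k - 1).toNat)))) := by
    intro res i j hj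
    rw [PySem.List.foldl_congr_mem' _ _
        (fun res k => res ++ (PySem.List.pyRange (k + 1) (n + 1) 1).map (fun m =>
          PySem.Int.bxor x (pvShl1 (m - 1).toNat +
            (pvShl1 (i - 1).toNat + pvShl1 (j - 1).toNat + pvShl1 (k - 1).toNat))))
        res ?_]
    · exact PySem.List.foldl_append_eq_flatMap _ _ _
    · intro k hk acc
      have hkb := (PySem.List.mem_pyRange_one.mp hk).1
      exact pv_inner x _ (n + 1) (k + 1) k acc (by omega) (by ring)
  have h2 : ∀ (res : List Int) (i : Int), 0 ≤ i →
      (PySem.List.pyRange (i + 1) (n - 1) 1).foldl (fun res j =>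
        (PySem.List.pyRange (j + 1) n 1).foldl (fun res k =>
          ((PySem.List.pyRange (k + 1) (n + 1) 1).foldl
              (fun (st : List Int × Int) _m =>
                (st.1 ++ [PySem.Int.bxor x (st.2 +
                  (pvShl1 (i - 1).toNat + pvShl1 (j - 1).toNat + pvShl1 (k - 1).toNat))],
                 st.2 <<< (1 : Nat)))
              (res, pvShl1 k.toNat)).1) res) res
      = res ++ (PySem.List.pyRange (i + 1) (n - 1) 1).flatMap (fun j =>
          (PySem.List.pyRange (j + 1) n 1).flatMap (fun k =>
            (PySem.List.pyRange (k + 1) (n + 1) 1).map (fun m =>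
              PySem.Int.bxor x (pvShl1 (m - 1).toNat +
                (pvShl1 (i - 1).toNat + pvShl1 (j - 1).toNat + pvShl1 (k - 1).toNat))))) := by
    intro res i hi
    rw [PySem.List.foldl_congr_mem' _ _
        (fun res j => res ++ (PySem.List.pyRange (j + 1) n 1).flatMap (fun k =>
          (PySem.List.pyRange (k + 1) (n + 1) 1).map (fun m =>
            PySem.Int.bxor x (pvShl1 (m - 1).toNat +
              (pvShl1 (i - 1).toNat + pvShl1 (j - 1).toNat + pvShl1 (k - 1).toNat)))))
        res ?_]
    · exact PySem.List.foldl_append_eq_flatMap _ _ _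
    · intro j hj acc
      have hjb := (PySem.List.mem_pyRange_one.mp hj).1
      exact h3 acc i j (by omega)
  have hA : get_4_bits_changed_nums x n
      = (PySem.List.pyRange 1 (n - 2) 1).flatMap (fun i =>
          (PySem.List.pyRange (i + 1) (n - 1) 1).flatMap (fun j =>
            (PySem.List.pyRange (j + 1) n 1).flatMap (fun k =>
              (PySem.List.pyRange (k + 1) (n + 1) 1).map (fun m =>
                PySem.Int.bxor x (pvShl1 (m - 1).toNat +
                  (pvShl1 (i - 1).toNat + pvShl1 (j - 1).toNat + pvShl1 (k - 1).toNat)))))) := by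
    simp only [get_4_bits_changed_nums]
    rw [PySem.List.foldl_congr_mem' _ _
        (fun res i => res ++ (PySem.List.pyRange (i + 1) (n - 1) 1).flatMap (fun j =>
          (PySem.List.pyRange (j + 1) n 1).flatMap (fun k =>
            (PySem.List.pyRange (k + 1) (n + 1) 1).map (fun m =>
              PySem.Int.bxor x (pvShl1 (m - 1).toNat +
                (pvShl1 (i - 1).toNat + pvShl1 (j - 1).toNat + pvShl1 (k - 1).toNat))))))
        [] ?_]
    · rw [PySem.List.foldl_append_eq_flatMap]
      simp only [List.nil_append]
    · intro i hi acc
      have hib := (PySem.List.mem_pyRange_one.mp hi).1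
      exact h2 acc i (by omega)
  -- B as the same tower, level by level
  have e1 : ∀ s : Int, 0 ≤ s →
      pvCombs n ((PySem.List.pyRange 0 n 1).map (fun p => pvShl1 p.toNat)) s 1
        = (PySem.List.pyRange s n 1).map (fun d => pvShl1 d.toNat) := by
    intro s hs
    show PySem.List.slice _ (some s) none = _
    rw [PySem.List.slice_from _ hs, pv_drop_pyRange_map _ n s.toNat 0, zero_add,
        Int.toNat_of_nonneg hs]
  have e2 : ∀ s : Int, 0 ≤ s →
      pvCombs n ((PySem.List.pyRange 0 n 1).map (fun p => pvShl1 p.toNat)) s 2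
        = (PySem.List.pyRange s (n - 1) 1).flatMap (fun c =>
            (PySem.List.pyRange (c + 1) n 1).map (fun d =>
              pvShl1 c.toNat + pvShl1 d.toNat)) := by
    intro s hs
    have he : pvCombs n ((PySem.List.pyRange 0 n 1).map (fun p => pvShl1 p.toNat)) s 2
        = (PySem.List.pyRange s (n - (((0 : Nat) : Int) + 1)) 1).flatMap (fun p =>
            [PySem.List.pyGetD ((PySem.List.pyRange 0 n 1).map (fun p => pvShl1 p.toNat)) p 0].flatMap (fun pw =>
              (pvCombs n ((PySem.List.pyRange 0 n 1).map (fun p => pvShl1 p.toNat)) (p + 1) 1).map (fun rest => pw + rest))) := rfl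
    rw [he, show (((0 : Nat) : Int) + 1) = 1 by norm_num]
    simp only [List.flatMap_singleton]
    refine pv_flatMap_congr ?_
    intro c hc
    have hcb := PySem.List.mem_pyRange_one.mp hc
    rw [e1 (c + 1) (by omega),
        PySem.List.pyGetD_map_pyRange_of_nonneg _ n c 0 (by omega) (by omega),
        List.map_map]
    rfl
  have e3 : ∀ s : Int, 0 ≤ s →
      pvCombs n ((PySem.List.pyRange 0 n 1).map (fun p => pvShl1 p.toNat)) s 3
        = (PySem.List.pyRange s (n - 2) 1).flatMap (fun b =>
            (PySem.List.pyRange (b + 1) (n - 1) 1).flatMap (fun c =>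
              (PySem.List.pyRange (c + 1) n 1).map (fun d =>
                pvShl1 b.toNat + (pvShl1 c.toNat + pvShl1 d.toNat)))) := by
    intro s hs
    have he : pvCombs n ((PySem.List.pyRange 0 n 1).map (fun p => pvShl1 p.toNat)) s 3
        = (PySem.List.pyRange s (n - (((1 : Nat) : Int) + 1)) 1).flatMap (fun p =>
            [PySem.List.pyGetD ((PySem.List.pyRange 0 n 1).map (fun p => pvShl1 p.toNat)) p 0].flatMap (fun pw =>
              (pvCombs n ((PySem.List.pyRange 0 n 1).map (fun p => pvShl1 p.toNat)) (p + 1) 2).map (fun rest => pw + rest))) := rfl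
    rw [he, show (((1 : Nat) : Int) + 1) = 2 by norm_num]
    simp only [List.flatMap_singleton]
    refine pv_flatMap_congr ?_
    intro b hb
    have hbb := PySem.List.mem_pyRange_one.mp hb
    rw [e2 (b + 1) (by omega),
        PySem.List.pyGetD_map_pyRange_of_nonneg _ n b 0 (by omega) (by omega)]
    simp only [List.map_flatMap, List.map_map]
    rfl
  have e4 : ∀ s : Int, 0 ≤ s →
      pvCombs n ((PySem.List.pyRange 0 n 1).map (fun p => pvShl1 p.toNat)) s 4
        = (PySem.List.pyRange s (n - 3) 1).flatMap (fun a =>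
            (PySem.List.pyRange (a + 1) (n - 2) 1).flatMap (fun b =>
              (PySem.List.pyRange (b + 1) (n - 1) 1).flatMap (fun c =>
                (PySem.List.pyRange (c + 1) n 1).map (fun d =>
                  pvShl1 a.toNat + (pvShl1 b.toNat + (pvShl1 c.toNat + pvShl1 d.toNat)))))) := by
    intro s hs
    have he : pvCombs n ((PySem.List.pyRange 0 n 1).map (fun p => pvShl1 p.toNat)) s 4
        = (PySem.List.pyRange s (n - (((2 : Nat) : Int) + 1)) 1).flatMap (fun p =>
            [PySem.List.pyGetD ((PySem.List.pyRange 0 n 1).map (fun p => pvShl1 p.toNat)) p 0].flatMap (fun pw =>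
              (pvCombs n ((PySem.List.pyRange 0 n 1).map (fun p => pvShl1 p.toNat)) (p + 1) 3).map (fun rest => pw + rest))) := rfl
    rw [he, show (((2 : Nat) : Int) + 1) = 3 by norm_num]
    simp only [List.flatMap_singleton]
    refine pv_flatMap_congr ?_
    intro a ha
    have hab := PySem.List.mem_pyRange_one.mp ha
    rw [e3 (a + 1) (by omega),
        PySem.List.pyGetD_map_pyRange_of_nonneg _ n a 0 (by omega) (by omega)]
    simp only [List.map_flatMap, List.map_map]
    rfl
  have hB : get_4_bits_changed_nums_alt x n
      = (PySem.List.pyRange 0 (n - 3) 1).flatMap (fun p =>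
          (PySem.List.pyRange (p + 1) (n - 2) 1).flatMap (fun q =>
            (PySem.List.pyRange (q + 1) (n - 1) 1).flatMap (fun r =>
              (PySem.List.pyRange (r + 1) n 1).map (fun s =>
                PySem.Int.bxor x (pvShl1 p.toNat + (pvShl1 q.toNat +
                  (pvShl1 r.toNat + pvShl1 s.toNat))))))) := by
    simp only [get_4_bits_changed_nums_alt]
    rw [e4 0 (le_refl 0)]
    simp only [List.map_flatMap, List.map_map]
    rfl
  rw [hA, hB]
  -- the two towers coincide (shift every index by one)
  rw [show (PySem.List.pyRange 1 (n - 2) 1) = (PySem.List.pyRange (0 + 1) ((n - 3) + 1) 1) by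
    have h : (n - 3 + 1 : Int) = n - 2 := by ring
    rw [h]; norm_num]
  refine pv_shift _ _ (n - 3) 0 ?_
  intro p hp0 hpn
  show (PySem.List.pyRange (p + 1 + 1) (n - 1) 1).flatMap _ = _
  rw [show (PySem.List.pyRange (p + 1 + 1) (n - 1) 1)
        = (PySem.List.pyRange ((p + 1) + 1) ((n - 2) + 1) 1) by
    have h : (n - 2 + 1 : Int) = n - 1 := by ring
    rw [h]]
  refine pv_shift _ _ (n - 2) (p + 1) ?_
  intro q hq0 hqn
  show (PySem.List.pyRange (q + 1 + 1) n 1).flatMap _ = _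
  rw [show (PySem.List.pyRange (q + 1 + 1) n 1)
        = (PySem.List.pyRange ((q + 1) + 1) ((n - 1) + 1) 1) by
    have h : (n - 1 + 1 : Int) = n := by ring
    rw [h]]
  refine pv_shift _ _ (n - 1) (q + 1) ?_
  intro r hr0 hrn
  show (PySem.List.pyRange (r + 1 + 1) (n + 1) 1).map _ = _
  refine pv_shift_map _ _ n (r + 1) ?_
  intro s hs0 hsn
  show PySem.Int.bxor x _ = PySem.Int.bxor x _
  congr 1
  rw [show (s + 1 - 1 : Int) = s by ring, show (p + 1 - 1 : Int) = p by ring,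
      show (q + 1 - 1 : Int) = q by ring, show (r + 1 - 1 : Int) = r by ring]
  ring
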